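-- pv_equiv track=rewrite | github.com/sauranildebs/sudoku-ai | lcv.py | lcv_heuristic
-- ===== SOURCE A (Python) =====
-- def lcv_heuristic(domain, position):
--     """Returns the value in the position's domain with the least constraining value (LCV) heuristic.
--
--     Input: current domain of the board and position where domain needs to be checked
--     Output: Dictionary with the values that is least constraining in ascending order
--     """
--
--     if len(domain[position[0]][position[1]]) == 1:
--         return domain[position[0]][position[1]]   #if domain size == 1, return the value itself
--
--     lcv = {}    #for counting the number of domains
--     list = domain[position[0]][position[1]]  #selecting the row of the given position
--     for i in list:
--         lcv[i] = 0
--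
--     #checking how many times that domain value appears in other unassigned variable's domain of row and storing in lcv
--     for row_idx in range(len(domain[0])):
--         for j in list:
--             if j in (domain[position[0]][row_idx]) and row_idx != position[1]:
--                 lcv[j] += 1   #increment count whenever it appears
--
--     #checking how many times that domain value appears in other unassigned variable's domain of column and storing in lcv
--     for col_idx in range(len(domain[0])):
--         for j in list:
--             if j in domain[col_idx][position[1]] and col_idx != position[0]:
--                 lcv[j] += 1
--
--     #check how many times that domain value appears in other unassigned variable's domain of that 3x3 box and store in lcv
--     row_box = position[0] // 3
--     column_box = position[1] // 3
--     for row_idx in range(row_box * 3, row_box * 3 + 3):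
--         for col_idx in range(column_box * 3, column_box * 3 + 3):
--             for j in list:
--             #exclude the row and column corresponding to the position
--                 if row_idx!= position[0] and col_idx!= position[1] and j in domain[row_idx][col_idx]:
--                     lcv[j] += 1
--
--     return sorted(lcv, key = lcv.get)   #return domains in ascending order
-- ===== SOURCE B (Python) =====
-- def lcv_heuristic(domain, position):
--     r, c = position
--     cell = domain[r][c]
--     if len(cell) <= 1:
--         return cell   # at most one candidate: nothing to order
--
--     n = len(domain[0])
--     rb, cb = r // 3 * 3, c // 3 * 3
--     counts = dict.fromkeys(cell, 0)
--     # one scan over the whole grid: a cell is a peer iff it shares exactly one of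
--     # the row/column, or lies in the 3x3 box off both; tally its distinct values
--     for i in range(n):
--         for j in range(n):
--             if ((i == r) != (j == c)) or (rb <= i < rb + 3 and cb <= j < cb + 3 and i != r and j != c):
--                 for v in dict.fromkeys(domain[i][j]):
--                     if v in counts:
--                         counts[v] += 1
--     # counting sort: emit candidates bucket by bucket in ascending constraint count
--     m = max(counts.values(), default=0)
--     return [v for t in range(m + 1) for v in counts if counts[v] == t]
-- ===== Notes on version B (the rewrite author's own statement) =====
-- stated objective: alternative
-- what changed: B replaces A's three shaped counting passes and comparison sort by a single scan over the whole grid with a peer predicate (tallying each peer cell's distinct values into the candidates' counters) followed by a counting sort that emits candidates bucket by bucket in ascending count.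
-- outside the precondition, e.g. on lcv_heuristic([[[5, 5, 7], [5], [7]], [[], [], []], [[], [], []]], (0, 0)): A returns [7, 5], B returns [5, 7]
import Mathlib
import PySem

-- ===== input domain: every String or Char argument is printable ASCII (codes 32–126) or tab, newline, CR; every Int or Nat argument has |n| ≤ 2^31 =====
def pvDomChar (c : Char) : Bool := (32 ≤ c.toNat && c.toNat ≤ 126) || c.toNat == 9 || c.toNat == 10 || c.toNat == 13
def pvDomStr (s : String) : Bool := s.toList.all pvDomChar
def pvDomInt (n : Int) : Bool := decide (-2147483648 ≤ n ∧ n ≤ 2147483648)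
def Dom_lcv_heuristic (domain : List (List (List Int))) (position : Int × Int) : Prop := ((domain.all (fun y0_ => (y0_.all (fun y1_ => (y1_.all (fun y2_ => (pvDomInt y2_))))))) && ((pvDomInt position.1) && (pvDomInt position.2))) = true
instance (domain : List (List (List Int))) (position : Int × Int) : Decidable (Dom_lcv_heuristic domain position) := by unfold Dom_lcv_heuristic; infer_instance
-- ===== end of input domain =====

-- B replaces A's three shaped counting passes + comparison sort by one scan over the whole grid
-- with a peer predicate and a counting sort over the tally buckets (alternative decomposition;
-- equivalence is about the return value only).

-- ===== PORT A =====
-- literal transliteration of A; cell accesses use pyGetD (in range under Pre_);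
-- `lcv[j] += 1` is `modify j 0 (· + 1)` (the key is always present: keys are initialised from `cell`);
-- `sorted(lcv, key=lcv.get)` is sorted over the keys with key `getD · 0` (every key is present, so
-- `lcv.get` returns exactly that count).
def lcv_heuristic (domain : List (List (List Int))) (position : Int × Int) : List Int :=
  let r := position.1
  let c := position.2
  let cell := PySem.List.pyGetD (PySem.List.pyGetD domain r []) c []
  if cell.length = 1 then cell
  else
    let lcv0 := cell.foldl (fun d i => d.insert i (0 : Int)) PySem.Dict.empty
    let n : Int := (PySem.List.pyGetD domain 0 []).length
    let lcv1 := (PySem.List.pyRange 0 n 1).foldl (fun d ri =>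
        cell.foldl (fun d j =>
          if j ∈ PySem.List.pyGetD (PySem.List.pyGetD domain r []) ri [] ∧ ri ≠ c
          then d.modify j 0 (· + 1) else d) d) lcv0
    let lcv2 := (PySem.List.pyRange 0 n 1).foldl (fun d ci =>
        cell.foldl (fun d j =>
          if j ∈ PySem.List.pyGetD (PySem.List.pyGetD domain ci []) c [] ∧ ci ≠ r
          then d.modify j 0 (· + 1) else d) d) lcv1
    let rb := PySem.Int.floordiv r 3
    let cb := PySem.Int.floordiv c 3
    let lcv3 := (PySem.List.pyRange (rb * 3) (rb * 3 + 3) 1).foldl (fun d ri =>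
        (PySem.List.pyRange (cb * 3) (cb * 3 + 3) 1).foldl (fun d ci =>
          cell.foldl (fun d j =>
            if ri ≠ r ∧ ci ≠ c ∧ j ∈ PySem.List.pyGetD (PySem.List.pyGetD domain ri []) ci []
            then d.modify j 0 (· + 1) else d) d) d) lcv2
    PySem.List.sorted lcv3.keys (fun k => lcv3.getD k 0) false

-- ===== PORT B =====
-- the peer predicate of Source B: shares exactly one of row/column, or lies in the 3x3 box off both
def pvPeerB (r c i j : Int) : Bool :=
  ((i == r) != (j == c)) ||
  (decide (PySem.Int.floordiv r 3 * 3 ≤ i) && decide (i < PySem.Int.floordiv r 3 * 3 + 3) &&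
   decide (PySem.Int.floordiv c 3 * 3 ≤ j) && decide (j < PySem.Int.floordiv c 3 * 3 + 3) &&
   (i != r) && (j != c))

-- transliteration of Source B: dict.fromkeys is a fold of inserts / PySem.List.dedup,
-- the grid scan tallies each peer cell's distinct values, then a counting sort emits
-- the candidates bucket by bucket in ascending count.
def lcv_heuristic_alt (domain : List (List (List Int))) (position : Int × Int) : List Int :=
  let r := position.1
  let c := position.2
  let cell := PySem.List.pyGetD (PySem.List.pyGetD domain r []) c []
  if cell.length ≤ 1 then cell
  else
    let n : Int := (PySem.List.pyGetD domain 0 []).length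
    let counts0 := cell.foldl (fun d v => d.insert v (0 : Int)) PySem.Dict.empty
    let counts := (PySem.List.pyRange 0 n 1).foldl (fun d i =>
        (PySem.List.pyRange 0 n 1).foldl (fun d j =>
          if pvPeerB r c i j then
            (PySem.List.dedup (PySem.List.pyGetD (PySem.List.pyGetD domain i []) j [])).foldl
              (fun d v => if d.contains v then d.modify v 0 (· + 1) else d) d
          else d) d) counts0
    let m := PySem.List.maxD counts.values (fun x => x) 0
    (PySem.List.pyRange 0 (m + 1) 1).flatMap (fun t =>
      counts.keys.filter (fun v => counts.getD v 0 == t))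

-- ===== PRECONDITION & SPEC =====
-- Pre_ admits: any input whose position indexes a cell (wraparound included) holding at most one
-- candidate (A returns that cell untouched), and otherwise boards that extend at least
-- n = len(domain[0]) rows and columns with a non-negative in-range position whose 3x3 box lies
-- inside [0, n) and whose candidate list has no repeated values.  It therefore excludes inputs on
-- which A still returns where (a) the candidate list has duplicates (A's dict-increment counts are
-- scaled by the multiplicity — an artefact), (b) the board is too ragged for the n×n scan / the
-- box sticks out of [0, n) yet A's three passes happen to stay in range (which cells get counted
-- is then an accident of A's scan shapes), or (c) the position is negative (A mixes wraparound
-- indexing with literal comparisons against the negative index) — see claim cites.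
def Pre_lcv_heuristic (domain : List (List (List Int))) (position : Int × Int) : Prop :=
  PySem.Raise.InRange domain.length position.1 ∧
  PySem.Raise.InRange (PySem.List.pyGetD domain position.1 []).length position.2 ∧
  (2 ≤ (PySem.List.pyGetD (PySem.List.pyGetD domain position.1 []) position.2 []).length →
    ((PySem.List.pyGetD (PySem.List.pyGetD domain position.1 []) position.2 []).Nodup ∧
     0 ≤ position.1 ∧ 0 ≤ position.2 ∧
     ((PySem.List.pyGetD domain 0 []).length : Int) ≤ (domain.length : Int) ∧
     (∀ i ∈ PySem.List.pyRange 0 ((PySem.List.pyGetD domain 0 []).length : Int) 1,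
        ((PySem.List.pyGetD domain 0 []).length : Int) ≤ ((PySem.List.pyGetD domain i []).length : Int)) ∧
     position.1 < ((PySem.List.pyGetD domain 0 []).length : Int) ∧
     position.2 < ((PySem.List.pyGetD domain 0 []).length : Int) ∧
     PySem.Int.floordiv position.1 3 * 3 + 3 ≤ ((PySem.List.pyGetD domain 0 []).length : Int) ∧
     PySem.Int.floordiv position.2 3 * 3 + 3 ≤ ((PySem.List.pyGetD domain 0 []).length : Int)))
instance (domain : List (List (List Int))) (position : Int × Int) : Decidable (Pre_lcv_heuristic domain position) := by unfold Pre_lcv_heuristic; infer_instance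

def pvWitness_lcv_heuristic : List (List (List Int)) × (Int × Int) :=
  (List.replicate 9 (List.replicate 9 ([1, 2] : List Int)), (4, 4))

def Spec_lcv_heuristic (domain : List (List (List Int))) (position : Int × Int) (out : List Int) : Prop := out = lcv_heuristic_alt domain position
instance (domain : List (List (List Int))) (position : Int × Int) (out : List Int) : Decidable (Spec_lcv_heuristic domain position out) := by unfold Spec_lcv_heuristic; infer_instance

-- ===== CLAIM (what is proved, stated in full; the proofs are below) =====
def Claim_equal_lcv_heuristic : Prop := ∀ (domain : List (List (List Int))) (position : Int × Int), Dom_lcv_heuristic domain position → Pre_lcv_heuristic domain position → Spec_lcv_heuristic domain position (lcv_heuristic domain position)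

-- ===== LEMMAS AND PROOFS =====

-- plain-form copies of the two else branches (definitionally equal to the ports' bodies)
def pvCell (domain : List (List (List Int))) (i j : Int) : List Int :=
  PySem.List.pyGetD (PySem.List.pyGetD domain i []) j []

def pvInit (cell : List Int) : PySem.Dict Int Int :=
  cell.foldl (fun d i => d.insert i (0 : Int)) PySem.Dict.empty

def pvPass1 (domain : List (List (List Int))) (r c n : Int) (cell : List Int)
    (d : PySem.Dict Int Int) : PySem.Dict Int Int :=
  (PySem.List.pyRange 0 n 1).foldl (fun d ri =>
    cell.foldl (fun d j =>
      if j ∈ pvCell domain r ri ∧ ri ≠ c then d.modify j 0 (· + 1) else d) d) d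

def pvPass2 (domain : List (List (List Int))) (r c n : Int) (cell : List Int)
    (d : PySem.Dict Int Int) : PySem.Dict Int Int :=
  (PySem.List.pyRange 0 n 1).foldl (fun d ci =>
    cell.foldl (fun d j =>
      if j ∈ pvCell domain ci c ∧ ci ≠ r then d.modify j 0 (· + 1) else d) d) d

def pvPass3 (domain : List (List (List Int))) (r c : Int) (cell : List Int)
    (d : PySem.Dict Int Int) : PySem.Dict Int Int :=
  (PySem.List.pyRange (PySem.Int.floordiv r 3 * 3) (PySem.Int.floordiv r 3 * 3 + 3) 1).foldl (fun d ri =>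
    (PySem.List.pyRange (PySem.Int.floordiv c 3 * 3) (PySem.Int.floordiv c 3 * 3 + 3) 1).foldl (fun d ci =>
      cell.foldl (fun d j =>
        if ri ≠ r ∧ ci ≠ c ∧ j ∈ pvCell domain ri ci then d.modify j 0 (· + 1) else d) d) d) d

def pvDictA (domain : List (List (List Int))) (r c : Int) : PySem.Dict Int Int :=
  pvPass3 domain r c (pvCell domain r c)
    (pvPass2 domain r c ((PySem.List.pyGetD domain 0 []).length) (pvCell domain r c)
      (pvPass1 domain r c ((PySem.List.pyGetD domain 0 []).length) (pvCell domain r c)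
        (pvInit (pvCell domain r c))))

def pvCmod (l : List Int) (d : PySem.Dict Int Int) : PySem.Dict Int Int :=
  l.foldl (fun d v => if d.contains v then d.modify v 0 (· + 1) else d) d

def pvScan (domain : List (List (List Int))) (r c n : Int)
    (d : PySem.Dict Int Int) : PySem.Dict Int Int :=
  (PySem.List.pyRange 0 n 1).foldl (fun d i =>
    (PySem.List.pyRange 0 n 1).foldl (fun d j =>
      if pvPeerB r c i j then pvCmod (PySem.List.dedup (pvCell domain i j)) d else d) d) d

def pvDictB (domain : List (List (List Int))) (r c : Int) : PySem.Dict Int Int :=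
  pvScan domain r c ((PySem.List.pyGetD domain 0 []).length) (pvInit (pvCell domain r c))

def pvOut (d : PySem.Dict Int Int) : List Int :=
  (PySem.List.pyRange 0 (PySem.List.maxD d.values (fun x => x) 0 + 1) 1).flatMap (fun t =>
    d.keys.filter (fun v => d.getD v 0 == t))

-- ---- A-side counting lemmas ----

-- one conditional-increment pass over `cell` adds (count of v in cell) to v's count when v passes
lemma getD_incr_fold (cell : List Int) (p : Int → Prop) [DecidablePred p]
    (d : PySem.Dict Int Int) (v : Int) :
    (cell.foldl (fun d j => if p j then d.modify j 0 (· + 1) else d) d).getD v 0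
      = d.getD v 0 + (if p v then (cell.count v : Int) else 0) := by
  induction cell generalizing d with
  | nil => simp
  | cons j t ih =>
    simp only [List.foldl_cons, List.count_cons]
    by_cases hj : p j
    · rw [if_pos hj, ih, PySem.Dict.getD_modify]
      by_cases hv : v = j
      · subst hv; simp [hj]; ring
      · simp [hv, Ne.symm hv]
    · rw [if_neg hj, ih]
      by_cases hv : v = j
      · subst hv; simp [hj]
      · simp [Ne.symm hv]

-- a fold whose every step adds g a to v's count adds the total
lemma getD_foldl_add {α : Type} (R : List α) (f : PySem.Dict Int Int → α → PySem.Dict Int Int)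
    (g : α → Int) (v : Int) (h : ∀ d a, (f d a).getD v 0 = d.getD v 0 + g a)
    (d : PySem.Dict Int Int) :
    (R.foldl f d).getD v 0 = d.getD v 0 + (R.map g).sum := by
  induction R generalizing d with
  | nil => simp
  | cons a t ih => simp only [List.foldl_cons, List.map_cons, List.sum_cons, ih, h]; ring

-- conditional increments never change the key list when every touched key is present
lemma keys_incr_fold (cell : List Int) (p : Int → Prop) [DecidablePred p]
    (d : PySem.Dict Int Int) (h : ∀ j ∈ cell, j ∈ d.keys) :
    (cell.foldl (fun d j => if p j then d.modify j 0 (· + 1) else d) d).keys = d.keys := by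
  induction cell generalizing d with
  | nil => simp
  | cons j t ih =>
    have hkey : ∀ (f : Int → Int), (d.modify j 0 f).keys = d.keys := by
      intro f
      rw [PySem.Dict.keys_modify, PySem.Dict.keys_insert_of_contains]
      exact (PySem.Dict.contains_iff_mem_keys d j).mpr (h j (by simp))
    simp only [List.foldl_cons]
    by_cases hj : p j
    · rw [if_pos hj, ih]
      · exact hkey _
      · intro x hx; rw [hkey]; exact h x (by simp [hx])
    · rw [if_neg hj, ih]
      exact fun x hx => h x (by simp [hx])

-- a fold whose steps preserve keys (given that S's members stay keys) preserves keys
lemma keys_foldl_pres {α : Type} (R : List α) (f : PySem.Dict Int Int → α → PySem.Dict Int Int)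
    (S : List Int)
    (h : ∀ (d : PySem.Dict Int Int) a, (∀ j ∈ S, j ∈ d.keys) → (f d a).keys = d.keys)
    (d : PySem.Dict Int Int) (hd : ∀ j ∈ S, j ∈ d.keys) :
    (R.foldl f d).keys = d.keys := by
  induction R generalizing d with
  | nil => rfl
  | cons a t ih =>
    have hstep := h d a hd
    simp only [List.foldl_cons]
    rw [ih (f d a) (by intro j hj; rw [hstep]; exact hd j hj), hstep]

-- initialising every candidate to 0 leaves every count at 0
lemma getD_init_fold (cell : List Int) (d : PySem.Dict Int Int) (v : Int)
    (h : d.getD v 0 = 0) :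
    (cell.foldl (fun d i => d.insert i (0 : Int)) d).getD v 0 = 0 := by
  induction cell generalizing d with
  | nil => exact h
  | cons i t ih =>
    simp only [List.foldl_cons]
    exact ih _ (by rw [PySem.Dict.getD_insert]; split <;> simp [h])

lemma keys_pass1 (domain : List (List (List Int))) (r c n : Int) (cell : List Int)
    (d : PySem.Dict Int Int) (hd : ∀ j ∈ cell, j ∈ d.keys) :
    (pvPass1 domain r c n cell d).keys = d.keys :=
  keys_foldl_pres _ _ cell (fun d _ hd' => keys_incr_fold cell _ d hd') d hd

lemma keys_pass2 (domain : List (List (List Int))) (r c n : Int) (cell : List Int)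
    (d : PySem.Dict Int Int) (hd : ∀ j ∈ cell, j ∈ d.keys) :
    (pvPass2 domain r c n cell d).keys = d.keys :=
  keys_foldl_pres _ _ cell (fun d _ hd' => keys_incr_fold cell _ d hd') d hd

lemma keys_pass3 (domain : List (List (List Int))) (r c : Int) (cell : List Int)
    (d : PySem.Dict Int Int) (hd : ∀ j ∈ cell, j ∈ d.keys) :
    (pvPass3 domain r c cell d).keys = d.keys :=
  keys_foldl_pres _ _ cell
    (fun d _ hd' => keys_foldl_pres _ _ cell (fun d _ hd'' => keys_incr_fold cell _ d hd'') d hd')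
    d hd

lemma keys_init (cell : List Int) :
    (pvInit cell).keys = PySem.Set.update (PySem.Dict.empty : PySem.Dict Int Int).keys cell :=
  PySem.Dict.keys_foldl_insert cell (fun _ _ => (0 : Int)) PySem.Dict.empty

lemma mem_keys_init (cell : List Int) (j : Int) (hj : j ∈ cell) : j ∈ (pvInit cell).keys := by
  rw [keys_init, PySem.Dict.keys_empty]
  exact (PySem.Set.mem_update _ _ _).mpr (Or.inr hj)

lemma keys_dictA (domain : List (List (List Int))) (r c : Int) :
    (pvDictA domain r c).keys = (pvInit (pvCell domain r c)).keys := by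
  have hmem : ∀ j ∈ pvCell domain r c, j ∈ (pvInit (pvCell domain r c)).keys :=
    fun j hj => mem_keys_init _ j hj
  have h1 : (pvPass1 domain r c ((PySem.List.pyGetD domain 0 []).length) (pvCell domain r c)
      (pvInit (pvCell domain r c))).keys = (pvInit (pvCell domain r c)).keys :=
    keys_pass1 _ _ _ _ _ _ hmem
  have hmem1 : ∀ j ∈ pvCell domain r c, j ∈ (pvPass1 domain r c
      ((PySem.List.pyGetD domain 0 []).length) (pvCell domain r c)
      (pvInit (pvCell domain r c))).keys := by
    intro j hj; rw [h1]; exact hmem j hj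
  have h2 := keys_pass2 domain r c ((PySem.List.pyGetD domain 0 []).length) (pvCell domain r c)
      _ hmem1
  have hmem2 : ∀ j ∈ pvCell domain r c, j ∈ (pvPass2 domain r c
      ((PySem.List.pyGetD domain 0 []).length) (pvCell domain r c)
      (pvPass1 domain r c ((PySem.List.pyGetD domain 0 []).length) (pvCell domain r c)
        (pvInit (pvCell domain r c)))).keys := by
    intro j hj; rw [h2]; exact hmem1 j hj
  have h3 := keys_pass3 domain r c (pvCell domain r c) _ hmem2
  unfold pvDictA
  rw [h3, h2, h1]

lemma getD_pass1 (domain : List (List (List Int))) (r c n : Int) (cell : List Int)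
    (d : PySem.Dict Int Int) (v : Int) :
    (pvPass1 domain r c n cell d).getD v 0 = d.getD v 0 +
      ((PySem.List.pyRange 0 n 1).map (fun ri =>
        if v ∈ pvCell domain r ri ∧ ri ≠ c then (cell.count v : Int) else 0)).sum := by
  unfold pvPass1
  exact getD_foldl_add (PySem.List.pyRange 0 n 1)
    (fun d ri => cell.foldl (fun d j =>
      if j ∈ pvCell domain r ri ∧ ri ≠ c then d.modify j 0 (· + 1) else d) d)
    (fun ri => if v ∈ pvCell domain r ri ∧ ri ≠ c then (cell.count v : Int) else 0)
    v (fun d ri => getD_incr_fold cell (fun j => j ∈ pvCell domain r ri ∧ ri ≠ c) d v) d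

lemma getD_pass2 (domain : List (List (List Int))) (r c n : Int) (cell : List Int)
    (d : PySem.Dict Int Int) (v : Int) :
    (pvPass2 domain r c n cell d).getD v 0 = d.getD v 0 +
      ((PySem.List.pyRange 0 n 1).map (fun ci =>
        if v ∈ pvCell domain ci c ∧ ci ≠ r then (cell.count v : Int) else 0)).sum := by
  unfold pvPass2
  exact getD_foldl_add (PySem.List.pyRange 0 n 1)
    (fun d ci => cell.foldl (fun d j =>
      if j ∈ pvCell domain ci c ∧ ci ≠ r then d.modify j 0 (· + 1) else d) d)
    (fun ci => if v ∈ pvCell domain ci c ∧ ci ≠ r then (cell.count v : Int) else 0)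
    v (fun d ci => getD_incr_fold cell (fun j => j ∈ pvCell domain ci c ∧ ci ≠ r) d v) d

lemma getD_pass3 (domain : List (List (List Int))) (r c : Int) (cell : List Int)
    (d : PySem.Dict Int Int) (v : Int) :
    (pvPass3 domain r c cell d).getD v 0 = d.getD v 0 +
      ((PySem.List.pyRange (PySem.Int.floordiv r 3 * 3) (PySem.Int.floordiv r 3 * 3 + 3) 1).map (fun ri =>
        ((PySem.List.pyRange (PySem.Int.floordiv c 3 * 3) (PySem.Int.floordiv c 3 * 3 + 3) 1).map (fun ci =>
          if ri ≠ r ∧ ci ≠ c ∧ v ∈ pvCell domain ri ci then (cell.count v : Int) else 0)).sum)).sum := by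
  unfold pvPass3
  exact getD_foldl_add (PySem.List.pyRange (PySem.Int.floordiv r 3 * 3) (PySem.Int.floordiv r 3 * 3 + 3) 1)
    (fun d ri => (PySem.List.pyRange (PySem.Int.floordiv c 3 * 3) (PySem.Int.floordiv c 3 * 3 + 3) 1).foldl
      (fun d ci => cell.foldl (fun d j =>
        if ri ≠ r ∧ ci ≠ c ∧ j ∈ pvCell domain ri ci then d.modify j 0 (· + 1) else d) d) d)
    (fun ri => ((PySem.List.pyRange (PySem.Int.floordiv c 3 * 3) (PySem.Int.floordiv c 3 * 3 + 3) 1).map (fun ci =>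
      if ri ≠ r ∧ ci ≠ c ∧ v ∈ pvCell domain ri ci then (cell.count v : Int) else 0)).sum)
    v
    (fun d ri => getD_foldl_add (PySem.List.pyRange (PySem.Int.floordiv c 3 * 3) (PySem.Int.floordiv c 3 * 3 + 3) 1)
      (fun d ci => cell.foldl (fun d j =>
        if ri ≠ r ∧ ci ≠ c ∧ j ∈ pvCell domain ri ci then d.modify j 0 (· + 1) else d) d)
      (fun ci => if ri ≠ r ∧ ci ≠ c ∧ v ∈ pvCell domain ri ci then (cell.count v : Int) else 0)
      v (fun d ci => getD_incr_fold cell (fun j => ri ≠ r ∧ ci ≠ c ∧ j ∈ pvCell domain ri ci) d v) d) d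

-- ---- B-side counting lemmas ----

lemma keys_cmod (l : List Int) (d : PySem.Dict Int Int) : (pvCmod l d).keys = d.keys := by
  unfold pvCmod
  induction l generalizing d with
  | nil => rfl
  | cons x t ih =>
    simp only [List.foldl_cons]
    by_cases hx : d.contains x = true
    · rw [if_pos hx, ih, PySem.Dict.keys_modify, PySem.Dict.keys_insert_of_contains d _ hx]
    · rw [if_neg hx, ih]

lemma contains_cmod (l : List Int) (d : PySem.Dict Int Int) (v : Int) :
    (pvCmod l d).contains v = d.contains v := by
  rw [PySem.Dict.contains_eq_decide_mem_keys, PySem.Dict.contains_eq_decide_mem_keys, keys_cmod]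

-- one conditional-increment pass over a peer's distinct values, at a key of fixed membership b
lemma getD_cmod (l : List Int) (d : PySem.Dict Int Int) (v : Int) (b : Bool)
    (hv : d.contains v = b) :
    (pvCmod l d).getD v 0 = d.getD v 0 + (if b then (l.count v : Int) else 0) := by
  unfold pvCmod
  induction l generalizing d with
  | nil => simp
  | cons x t ih =>
    simp only [List.foldl_cons, List.count_cons]
    by_cases hx : d.contains x = true
    · rw [if_pos hx]
      have hcm : (d.modify x 0 (· + 1)).contains v = d.contains v := by
        rw [PySem.Dict.contains_modify]
        by_cases hvx : v = x
        · subst hvx; simp [hx]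
        · simp [hvx]
      rw [ih _ (hcm.trans hv), PySem.Dict.getD_modify]
      by_cases hvx : v = x
      · subst hvx
        have hb : b = true := hv ▸ hx
        subst hb; simp; ring
      · simp [hvx, Ne.symm hvx]
    · rw [if_neg hx, ih _ hv]
      by_cases hvx : v = x
      · subst hvx
        have hb : b = false := by rw [← hv]; simpa using hx
        subst hb; simp
      · simp [Ne.symm hvx]

-- a fold whose every step preserves membership of v and adds g a to v's count
lemma getD_foldl_add_inv {α : Type} (R : List α) (f : PySem.Dict Int Int → α → PySem.Dict Int Int)
    (g : α → Int) (v : Int) (b : Bool)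
    (h : ∀ d a, d.contains v = b → (f d a).contains v = b ∧ (f d a).getD v 0 = d.getD v 0 + g a)
    (d : PySem.Dict Int Int) (hd : d.contains v = b) :
    (R.foldl f d).contains v = b ∧ (R.foldl f d).getD v 0 = d.getD v 0 + (R.map g).sum := by
  induction R generalizing d with
  | nil => simpa using hd
  | cons a t ih =>
    obtain ⟨hc, hg⟩ := h d a hd
    obtain ⟨hc', hg'⟩ := ih (f d a) hc
    refine ⟨hc', ?_⟩
    simp only [List.foldl_cons, List.map_cons, List.sum_cons] at *
    rw [hg', hg]; ring

lemma getD_scan (domain : List (List (List Int))) (r c n : Int)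
    (d : PySem.Dict Int Int) (v : Int) (b : Bool) (hv : d.contains v = b) :
    (pvScan domain r c n d).getD v 0 = d.getD v 0 +
      (if b then
        ((PySem.List.pyRange 0 n 1).map (fun i =>
          ((PySem.List.pyRange 0 n 1).map (fun j =>
            if pvPeerB r c i j then ((PySem.List.dedup (pvCell domain i j)).count v : Int)
            else 0)).sum)).sum
       else 0) := by
  have hstep : ∀ (d : PySem.Dict Int Int) (i : Int), d.contains v = b →
      ((PySem.List.pyRange 0 n 1).foldl (fun d j =>
        if pvPeerB r c i j then pvCmod (PySem.List.dedup (pvCell domain i j)) d else d) d).contains v = b ∧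
      ((PySem.List.pyRange 0 n 1).foldl (fun d j =>
        if pvPeerB r c i j then pvCmod (PySem.List.dedup (pvCell domain i j)) d else d) d).getD v 0
        = d.getD v 0 + ((PySem.List.pyRange 0 n 1).map (fun j =>
            if pvPeerB r c i j then (if b then ((PySem.List.dedup (pvCell domain i j)).count v : Int) else 0)
            else 0)).sum := by
    intro d i hd
    refine getD_foldl_add_inv _ _ _ v b (fun d j hdj => ?_) d hd
    by_cases hp : pvPeerB r c i j = true
    · rw [if_pos hp, if_pos hp]
      exact ⟨by rw [contains_cmod]; exact hdj, getD_cmod _ _ _ b hdj⟩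
    · rw [if_neg hp, if_neg hp]
      exact ⟨hdj, by simp⟩
  have hmain := getD_foldl_add_inv (PySem.List.pyRange 0 n 1)
    (fun d i => (PySem.List.pyRange 0 n 1).foldl (fun d j =>
      if pvPeerB r c i j then pvCmod (PySem.List.dedup (pvCell domain i j)) d else d) d)
    (fun i => ((PySem.List.pyRange 0 n 1).map (fun j =>
      if pvPeerB r c i j then (if b then ((PySem.List.dedup (pvCell domain i j)).count v : Int) else 0)
      else 0)).sum)
    v b (fun d i hd => hstep d i hd) d hv
  rw [pvScan, hmain.2]
  cases b with
  | true => simp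
  | false => simp

lemma keys_scan (domain : List (List (List Int))) (r c n : Int) (d : PySem.Dict Int Int) :
    (pvScan domain r c n d).keys = d.keys := by
  unfold pvScan
  have houter : ∀ (L : List Int) (d : PySem.Dict Int Int) (i : Int),
      (L.foldl (fun d j =>
        if pvPeerB r c i j then pvCmod (PySem.List.dedup (pvCell domain i j)) d else d) d).keys = d.keys := by
    intro L
    induction L with
    | nil => intro d i; rfl
    | cons j t ih =>
      intro d i
      simp only [List.foldl_cons]
      rw [ih]
      by_cases hp : pvPeerB r c i j = true
      · rw [if_pos hp, keys_cmod]
      · rw [if_neg hp]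
  have hmain : ∀ (L : List Int) (d : PySem.Dict Int Int),
      (L.foldl (fun d i => (PySem.List.pyRange 0 n 1).foldl (fun d j =>
        if pvPeerB r c i j then pvCmod (PySem.List.dedup (pvCell domain i j)) d else d) d) d).keys = d.keys := by
    intro L
    induction L with
    | nil => intro d; rfl
    | cons i t ih =>
      intro d
      simp only [List.foldl_cons]
      rw [ih, houter]
  exact hmain _ d

lemma keys_dictB (domain : List (List (List Int))) (r c : Int) :
    (pvDictB domain r c).keys = (pvInit (pvCell domain r c)).keys :=
  keys_scan _ _ _ _ _

-- ---- generic sum lemmas ----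

lemma count_dedup (l : List Int) (v : Int) :
    ((PySem.List.dedup l).count v : Int) = if v ∈ l then 1 else 0 := by
  by_cases hv : v ∈ l
  · rw [if_pos hv]
    have h1 : (PySem.List.dedup l).count v = 1 :=
      List.count_eq_one_of_mem (PySem.List.nodup_dedup l)
        (by rw [PySem.List.mem_dedup]; exact hv)
    rw [h1]; rfl
  · rw [if_neg hv]
    have h0 : (PySem.List.dedup l).count v = 0 :=
      List.count_eq_zero.mpr (by rw [PySem.List.mem_dedup]; exact hv)
    rw [h0]; rfl

lemma sum_ite_eq_of_nodup (l : List Int) (h : Int → Int) (r : Int)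
    (hr : r ∈ l) (hn : l.Nodup) :
    (l.map (fun i => if i = r then h i else 0)).sum = h r := by
  induction l with
  | nil => cases hr
  | cons x t ih =>
    simp only [List.map_cons, List.sum_cons]
    rcases List.mem_cons.mp hr with hx | ht
    · subst hx
      have hnr : r ∉ t := (List.nodup_cons.mp hn).1
      have hz : (t.map (fun i => if i = r then h i else 0)).sum = 0 := by
        apply List.sum_eq_zero
        intro x hx
        obtain ⟨i, hi, rfl⟩ := List.mem_map.mp hx
        rw [if_neg (fun he => hnr (by rw [← he]; exact hi))]
      rw [hz, if_pos rfl]; ring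
    · have hxr : ¬ x = r := fun he => (List.nodup_cons.mp hn).1 (by rw [he]; exact ht)
      rw [if_neg hxr, ih ht (List.nodup_cons.mp hn).2]; ring

lemma sum_push {α : Type} (l : List α) (p : Prop) [Decidable p] (Q : α → Prop)
    [DecidablePred Q] :
    (l.map (fun j => if p ∧ Q j then (1 : Int) else 0)).sum
      = if p then (l.map (fun j => if Q j then (1 : Int) else 0)).sum else 0 := by
  by_cases hp : p
  · simp [hp]
  · simp [hp]

lemma sum_map_zero {α : Type} (l : List α) (f : α → Int) (h : ∀ x ∈ l, f x = 0) :
    (l.map f).sum = 0 := by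
  apply List.sum_eq_zero
  intro x hx
  obtain ⟨a, ha, rfl⟩ := List.mem_map.mp hx
  exact h a ha

lemma ite_split3 (p q s t : Prop) [Decidable p] [Decidable q] [Decidable s] [Decidable t]
    (hpq : ¬(p ∧ q)) (hps : ¬(p ∧ s)) (hqs : ¬(q ∧ s)) :
    (if (p ∨ q ∨ s) ∧ t then (1 : Int) else 0)
      = (if p ∧ t then (1 : Int) else 0) + (if q ∧ t then (1 : Int) else 0)
        + (if s ∧ t then (1 : Int) else 0) := by
  by_cases hp : p <;> by_cases hq : q <;> by_cases hs : s <;> by_cases ht : t <;> simp_all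

lemma pvPeerB_iff (r c i j : Int) :
    pvPeerB r c i j = true ↔
      ((i = r ∧ ¬ j = c) ∨ (j = c ∧ ¬ i = r) ∨
       (PySem.Int.floordiv r 3 * 3 ≤ i ∧ i < PySem.Int.floordiv r 3 * 3 + 3 ∧
        PySem.Int.floordiv c 3 * 3 ≤ j ∧ j < PySem.Int.floordiv c 3 * 3 + 3 ∧
        ¬ i = r ∧ ¬ j = c)) := by
  simp only [pvPeerB, Bool.or_eq_true, bne_iff_ne, ne_eq, Bool.and_eq_true, decide_eq_true_eq,
    bne_iff_ne]
  constructor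
  · rintro (h | h)
    · by_cases hi : i = r
      · left; exact ⟨hi, fun hj => h (by simp [hi, hj])⟩
      · right; left
        refine ⟨?_, hi⟩
        by_contra hj
        exact h (by simp [hi, hj])
    · right; right; tauto
  · rintro (⟨hi, hj⟩ | ⟨hj, hi⟩ | h)
    · left; simp [hi, hj]
    · left; simp [hi, hj]
    · right; tauto

lemma ite_nest (p q : Prop) [Decidable p] [Decidable q] :
    (if p ∧ q then (1 : Int) else 0) = if p then (if q then (1 : Int) else 0) else 0 := by
  by_cases hp : p <;> by_cases hq : q <;> simp [hp, hq]

lemma sum_restrict (lo hi n : Int) (h0 : 0 ≤ lo) (hlh : lo ≤ hi) (hhn : hi ≤ n)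
    (F : Int → Int) (hF : ∀ i, (i < lo ∨ hi ≤ i) → F i = 0) :
    ((PySem.List.pyRange 0 n 1).map F).sum = ((PySem.List.pyRange lo hi 1).map F).sum := by
  rw [PySem.List.pyRange_one_append 0 lo n h0 (le_trans hlh hhn),
      PySem.List.pyRange_one_append lo hi n hlh hhn,
      List.map_append, List.map_append, List.sum_append, List.sum_append,
      sum_map_zero _ _ (fun i hi' => hF i (Or.inl (PySem.List.mem_pyRange_one.mp hi').2)),
      sum_map_zero _ _ (fun i hi' => hF i (Or.inr (PySem.List.mem_pyRange_one.mp hi').1))]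
  ring

lemma sum_S1 (domain : List (List (List Int))) (r c n v : Int)
    (hr0 : 0 ≤ r) (hrn : r < n) :
    ((PySem.List.pyRange 0 n 1).map (fun i =>
      ((PySem.List.pyRange 0 n 1).map (fun j =>
        if (i = r ∧ ¬ j = c) ∧ v ∈ pvCell domain i j then (1 : Int) else 0)).sum)).sum
    = ((PySem.List.pyRange 0 n 1).map (fun ri =>
        if v ∈ pvCell domain r ri ∧ ri ≠ c then (1 : Int) else 0)).sum := by
  have h1 : ∀ i : Int,
      ((PySem.List.pyRange 0 n 1).map (fun j =>
        if (i = r ∧ ¬ j = c) ∧ v ∈ pvCell domain i j then (1 : Int) else 0)).sum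
      = if i = r then ((PySem.List.pyRange 0 n 1).map (fun j =>
          if ¬ j = c ∧ v ∈ pvCell domain i j then (1 : Int) else 0)).sum else 0 := by
    intro i
    rw [← sum_push (PySem.List.pyRange 0 n 1) (i = r) (fun j => ¬ j = c ∧ v ∈ pvCell domain i j)]
    exact congrArg List.sum (List.map_congr_left (fun j _ => if_congr (by tauto) rfl rfl))
  rw [List.map_congr_left (fun i _ => h1 i),
      sum_ite_eq_of_nodup _ _ r (PySem.List.mem_pyRange_one.mpr ⟨hr0, hrn⟩)
        (PySem.List.nodup_pyRange_one 0 n)]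
  exact congrArg List.sum (List.map_congr_left (fun j _ => if_congr (by tauto) rfl rfl))

lemma sum_S2 (domain : List (List (List Int))) (r c n v : Int)
    (hc0 : 0 ≤ c) (hcn : c < n) :
    ((PySem.List.pyRange 0 n 1).map (fun i =>
      ((PySem.List.pyRange 0 n 1).map (fun j =>
        if (j = c ∧ ¬ i = r) ∧ v ∈ pvCell domain i j then (1 : Int) else 0)).sum)).sum
    = ((PySem.List.pyRange 0 n 1).map (fun ci =>
        if v ∈ pvCell domain ci c ∧ ci ≠ r then (1 : Int) else 0)).sum := by
  have h1 : ∀ i : Int,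
      ((PySem.List.pyRange 0 n 1).map (fun j =>
        if (j = c ∧ ¬ i = r) ∧ v ∈ pvCell domain i j then (1 : Int) else 0)).sum
      = if ¬ i = r ∧ v ∈ pvCell domain i c then (1 : Int) else 0 := by
    intro i
    have h2 : ∀ j : Int,
        (if (j = c ∧ ¬ i = r) ∧ v ∈ pvCell domain i j then (1 : Int) else 0)
        = if j = c then (if ¬ i = r ∧ v ∈ pvCell domain i j then (1 : Int) else 0) else 0 := by
      intro j
      rw [← ite_nest]
      exact if_congr (by tauto) rfl rfl
    rw [List.map_congr_left (fun j _ => h2 j),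
        sum_ite_eq_of_nodup _ _ c (PySem.List.mem_pyRange_one.mpr ⟨hc0, hcn⟩)
          (PySem.List.nodup_pyRange_one 0 n)]
  rw [List.map_congr_left (fun i _ => h1 i)]
  exact congrArg List.sum (List.map_congr_left (fun i _ => if_congr (by tauto) rfl rfl))

lemma sum_S3 (domain : List (List (List Int))) (r c n v : Int)
    (hr0 : 0 ≤ r) (hc0 : 0 ≤ c)
    (hrb : PySem.Int.floordiv r 3 * 3 + 3 ≤ n) (hcb : PySem.Int.floordiv c 3 * 3 + 3 ≤ n) :
    ((PySem.List.pyRange 0 n 1).map (fun i =>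
      ((PySem.List.pyRange 0 n 1).map (fun j =>
        if (PySem.Int.floordiv r 3 * 3 ≤ i ∧ i < PySem.Int.floordiv r 3 * 3 + 3 ∧
            PySem.Int.floordiv c 3 * 3 ≤ j ∧ j < PySem.Int.floordiv c 3 * 3 + 3 ∧
            ¬ i = r ∧ ¬ j = c) ∧ v ∈ pvCell domain i j then (1 : Int) else 0)).sum)).sum
    = ((PySem.List.pyRange (PySem.Int.floordiv r 3 * 3) (PySem.Int.floordiv r 3 * 3 + 3) 1).map (fun ri =>
        ((PySem.List.pyRange (PySem.Int.floordiv c 3 * 3) (PySem.Int.floordiv c 3 * 3 + 3) 1).map (fun ci =>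
          if ri ≠ r ∧ ci ≠ c ∧ v ∈ pvCell domain ri ci then (1 : Int) else 0)).sum)).sum := by
  have hrb0 : 0 ≤ PySem.Int.floordiv r 3 * 3 := by
    rw [PySem.Int.floordiv_eq_ediv_of_pos (by norm_num)]
    have := Int.ediv_nonneg hr0 (by norm_num : (0:Int) ≤ 3)
    omega
  have hcb0 : 0 ≤ PySem.Int.floordiv c 3 * 3 := by
    rw [PySem.Int.floordiv_eq_ediv_of_pos (by norm_num)]
    have := Int.ediv_nonneg hc0 (by norm_num : (0:Int) ≤ 3)
    omega
  rw [sum_restrict (PySem.Int.floordiv r 3 * 3) (PySem.Int.floordiv r 3 * 3 + 3) n hrb0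
        (by omega) hrb _
        (by
          intro i hi
          apply sum_map_zero
          intro j _
          rw [if_neg]
          rintro ⟨⟨h1, h2, -⟩, -⟩
          omega)]
  refine congrArg List.sum (List.map_congr_left (fun i hi => ?_))
  have hib := PySem.List.mem_pyRange_one.mp hi
  rw [sum_restrict (PySem.Int.floordiv c 3 * 3) (PySem.Int.floordiv c 3 * 3 + 3) n hcb0
        (by omega) hcb _
        (by
          intro j hj
          rw [if_neg]
          rintro ⟨⟨-, -, h3, h4, -⟩, -⟩
          omega)]
  refine congrArg List.sum (List.map_congr_left (fun j hj => ?_))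
  have hjb := PySem.List.mem_pyRange_one.mp hj
  refine if_congr ?_ rfl rfl
  constructor
  · rintro ⟨⟨-, -, -, -, hir, hjc⟩, hm⟩; exact ⟨hir, hjc, hm⟩
  · rintro ⟨hir, hjc, hm⟩; exact ⟨⟨hib.1, hib.2, hjb.1, hjb.2, hir, hjc⟩, hm⟩

-- the central counting identity: one grid scan with the peer predicate tallies exactly
-- what A's three shaped passes tally
lemma count_eq (domain : List (List (List Int))) (r c n : Int) (v : Int)
    (hr0 : 0 ≤ r) (hc0 : 0 ≤ c) (hrn : r < n) (hcn : c < n)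
    (hrb : PySem.Int.floordiv r 3 * 3 + 3 ≤ n) (hcb : PySem.Int.floordiv c 3 * 3 + 3 ≤ n) :
    ((PySem.List.pyRange 0 n 1).map (fun i =>
      ((PySem.List.pyRange 0 n 1).map (fun j =>
        if pvPeerB r c i j then (if v ∈ pvCell domain i j then (1 : Int) else 0) else 0)).sum)).sum
    = ((PySem.List.pyRange 0 n 1).map (fun ri =>
        if v ∈ pvCell domain r ri ∧ ri ≠ c then (1 : Int) else 0)).sum
      + ((PySem.List.pyRange 0 n 1).map (fun ci =>
          if v ∈ pvCell domain ci c ∧ ci ≠ r then (1 : Int) else 0)).sum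
      + ((PySem.List.pyRange (PySem.Int.floordiv r 3 * 3) (PySem.Int.floordiv r 3 * 3 + 3) 1).map (fun ri =>
          ((PySem.List.pyRange (PySem.Int.floordiv c 3 * 3) (PySem.Int.floordiv c 3 * 3 + 3) 1).map (fun ci =>
            if ri ≠ r ∧ ci ≠ c ∧ v ∈ pvCell domain ri ci then (1 : Int) else 0)).sum)).sum := by
  have hterm : ∀ i j : Int,
      (if pvPeerB r c i j then (if v ∈ pvCell domain i j then (1 : Int) else 0) else 0)
      = (if (i = r ∧ ¬ j = c) ∧ v ∈ pvCell domain i j then (1 : Int) else 0)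
        + (if (j = c ∧ ¬ i = r) ∧ v ∈ pvCell domain i j then (1 : Int) else 0)
        + (if (PySem.Int.floordiv r 3 * 3 ≤ i ∧ i < PySem.Int.floordiv r 3 * 3 + 3 ∧
              PySem.Int.floordiv c 3 * 3 ≤ j ∧ j < PySem.Int.floordiv c 3 * 3 + 3 ∧
              ¬ i = r ∧ ¬ j = c) ∧ v ∈ pvCell domain i j then (1 : Int) else 0) := by
    intro i j
    have hstep : (if pvPeerB r c i j then (if v ∈ pvCell domain i j then (1 : Int) else 0) else 0)
        = if ((i = r ∧ ¬ j = c) ∨ (j = c ∧ ¬ i = r) ∨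
              (PySem.Int.floordiv r 3 * 3 ≤ i ∧ i < PySem.Int.floordiv r 3 * 3 + 3 ∧
               PySem.Int.floordiv c 3 * 3 ≤ j ∧ j < PySem.Int.floordiv c 3 * 3 + 3 ∧
               ¬ i = r ∧ ¬ j = c)) ∧ v ∈ pvCell domain i j then (1 : Int) else 0 := by
      by_cases hp : pvPeerB r c i j = true
      · rw [if_pos hp, ite_nest, if_pos ((pvPeerB_iff r c i j).mp hp)]
      · rw [if_neg hp, if_neg (fun hand => hp ((pvPeerB_iff r c i j).mpr hand.1))]
    rw [hstep]
    exact ite_split3 _ _ _ _ (by tauto) (by tauto) (by tauto)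
  have hinner : ∀ i : Int,
      ((PySem.List.pyRange 0 n 1).map (fun j =>
        if pvPeerB r c i j then (if v ∈ pvCell domain i j then (1 : Int) else 0) else 0)).sum
      = ((PySem.List.pyRange 0 n 1).map (fun j =>
          if (i = r ∧ ¬ j = c) ∧ v ∈ pvCell domain i j then (1 : Int) else 0)).sum
        + ((PySem.List.pyRange 0 n 1).map (fun j =>
            if (j = c ∧ ¬ i = r) ∧ v ∈ pvCell domain i j then (1 : Int) else 0)).sum
        + ((PySem.List.pyRange 0 n 1).map (fun j =>
            if (PySem.Int.floordiv r 3 * 3 ≤ i ∧ i < PySem.Int.floordiv r 3 * 3 + 3 ∧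
                PySem.Int.floordiv c 3 * 3 ≤ j ∧ j < PySem.Int.floordiv c 3 * 3 + 3 ∧
                ¬ i = r ∧ ¬ j = c) ∧ v ∈ pvCell domain i j then (1 : Int) else 0)).sum := by
    intro i
    rw [List.map_congr_left (fun j _ => hterm i j), PySem.List.sum_map_add_int,
        PySem.List.sum_map_add_int]
  rw [List.map_congr_left (fun i _ => hinner i), PySem.List.sum_map_add_int,
      PySem.List.sum_map_add_int,
      sum_S1 domain r c n v hr0 hrn, sum_S2 domain r c n v hc0 hcn,
      sum_S3 domain r c n v hr0 hc0 hrb hcb]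

-- the two dictionaries store the same count at every key
lemma getD_AB (domain : List (List (List Int))) (r c : Int)
    (hnd : (pvCell domain r c).Nodup)
    (hr0 : 0 ≤ r) (hc0 : 0 ≤ c)
    (hrn : r < ((PySem.List.pyGetD domain 0 []).length : Int))
    (hcn : c < ((PySem.List.pyGetD domain 0 []).length : Int))
    (hrb : PySem.Int.floordiv r 3 * 3 + 3 ≤ ((PySem.List.pyGetD domain 0 []).length : Int))
    (hcb : PySem.Int.floordiv c 3 * 3 + 3 ≤ ((PySem.List.pyGetD domain 0 []).length : Int))
    (v : Int) :
    (pvDictA domain r c).getD v 0 = (pvDictB domain r c).getD v 0 := by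
  have hinit0 : (pvInit (pvCell domain r c)).getD v 0 = 0 :=
    getD_init_fold _ _ _ (PySem.Dict.getD_empty v 0)
  by_cases hv : v ∈ pvCell domain r c
  · have hb : (pvInit (pvCell domain r c)).contains v = true :=
      (PySem.Dict.contains_iff_mem_keys _ _).mpr (mem_keys_init _ _ hv)
    unfold pvDictA pvDictB
    rw [getD_pass3, getD_pass2, getD_pass1, hinit0, zero_add,
        getD_scan domain r c ((PySem.List.pyGetD domain 0 []).length)
          (pvInit (pvCell domain r c)) v true hb,
        hinit0, zero_add, if_pos rfl]
    have hc1 : ((pvCell domain r c).count v : Int) = 1 := by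
      rw [List.count_eq_one_of_mem hnd hv]; rfl
    simp only [hc1]
    rw [← count_eq domain r c ((PySem.List.pyGetD domain 0 []).length) v hr0 hc0 hrn hcn hrb hcb]
    refine congrArg List.sum (List.map_congr_left fun i _ => ?_)
    refine congrArg List.sum (List.map_congr_left fun j _ => ?_)
    by_cases hp : pvPeerB r c i j = true
    · rw [if_pos hp, if_pos hp, count_dedup]
    · rw [if_neg hp, if_neg hp]
  · have hbf : (pvInit (pvCell domain r c)).contains v = false := by
      rw [PySem.Dict.contains_eq_decide_mem_keys, keys_init, PySem.Dict.keys_empty]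
      simp only [decide_eq_false_iff_not]
      intro hmem
      rcases (PySem.Set.mem_update _ _ _).mp hmem with h | h
      · cases h
      · exact hv h
    unfold pvDictA pvDictB
    rw [getD_pass3, getD_pass2, getD_pass1, hinit0, zero_add,
        getD_scan domain r c ((PySem.List.pyGetD domain 0 []).length)
          (pvInit (pvCell domain r c)) v false hbf,
        hinit0, zero_add]
    have hc0' : ((pvCell domain r c).count v : Int) = 0 := by
      rw [List.count_eq_zero.mpr hv]; rfl
    simp only [hc0', ite_self]
    simp

-- ---- stability: a counting sort is exactly Python's stable sort by count ----

lemma insertBy_middle (f : Int → Int) (x : Int) (l1 l2 : List Int)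
    (h1 : ∀ y ∈ l1, ¬ f x < f y) (h2 : ∀ y ∈ l2, f x < f y) :
    PySem.List.insertBy (fun a b => decide (f a < f b)) x (l1 ++ l2) = l1 ++ x :: l2 := by
  induction l1 with
  | nil =>
    cases l2 with
    | nil => rfl
    | cons y t =>
      simp only [List.nil_append, PySem.List.insertBy]
      rw [if_pos (by simp only [decide_eq_true_eq]; exact h2 y (by simp))]
  | cons y t ih =>
    simp only [List.cons_append, PySem.List.insertBy]
    rw [if_neg (by simpa using h1 y (by simp)), ih (fun z hz => h1 z (by simp [hz]))]

lemma flatMap_filter_snoc (f : Int → Int) (ks : List Int) (k : Int) (ts' : List Int)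
    (h : ∀ t ∈ ts', ¬ t = f k) :
    ts'.flatMap (fun t => (ks ++ [k]).filter (fun v => f v == t))
      = ts'.flatMap (fun t => ks.filter (fun v => f v == t)) := by
  induction ts' with
  | nil => rfl
  | cons t ts ih =>
    simp only [List.flatMap_cons]
    rw [ih (fun x hx => h x (by simp [hx]))]
    congr 1
    rw [List.filter_append]
    have : ([k].filter (fun v => f v == t)) = [] := by
      simp only [List.filter_cons, List.filter_nil]
      rw [if_neg (by simpa using fun he => h t (by simp) he.symm)]
    rw [this, List.append_nil]

lemma foldl_insertBy_buckets (f : Int → Int) (ks ts : List Int)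
    (hts : ts.Pairwise (· < ·)) (hmem : ∀ k ∈ ks, f k ∈ ts) :
    ks.foldl (fun acc x => PySem.List.insertBy (fun a b => decide (f a < f b)) x acc) []
      = ts.flatMap (fun t => ks.filter (fun v => f v == t)) := by
  induction ks using List.reverseRecOn with
  | nil => simp
  | append_singleton ks k ih =>
    rw [List.foldl_append, List.foldl_cons, List.foldl_nil,
        ih (fun x hx => hmem x (by simp [hx]))]
    obtain ⟨t1, t2, hsplit⟩ := List.append_of_mem (hmem k (by simp))
    rw [hsplit] at hts ⊢
    rw [List.pairwise_append] at hts
    obtain ⟨hp1, hp2, hcross⟩ := hts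
    have ht2 : ∀ y ∈ t2, f k < y := (List.pairwise_cons.mp hp2).1
    have ht1 : ∀ y ∈ t1, y < f k := fun y hy => hcross y hy (f k) (by simp)
    simp only [List.flatMap_append, List.flatMap_cons]
    -- the new key k lands in no bucket of t1 or t2 and at the END of its own bucket
    rw [flatMap_filter_snoc f ks k t1 (fun t ht he => absurd (he ▸ ht1 t ht) (lt_irrefl _)),
        flatMap_filter_snoc f ks k t2 (fun t ht he => absurd (he ▸ ht2 t ht) (lt_irrefl _))]
    have hself : (ks ++ [k]).filter (fun v => f v == (f k)) =
        ks.filter (fun v => f v == (f k)) ++ [k] := by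
      rw [List.filter_append]
      simp
    rw [hself]
    -- insertion into the concatenated buckets stops exactly there
    have hins := insertBy_middle f k
      (t1.flatMap (fun t => ks.filter (fun v => f v == t)) ++
        ks.filter (fun v => f v == (f k)))
      (t2.flatMap (fun t => ks.filter (fun v => f v == t)))
      (by
        intro y hy
        rcases List.mem_append.mp hy with hy1 | hy2
        · obtain ⟨t, ht, hyf⟩ := List.mem_flatMap.mp hy1
          have : f y = t := by simpa using (List.mem_filter.mp hyf).2
          have := ht1 t ht
          omega
        · have : f y = f k := by simpa using (List.mem_filter.mp hy2).2
          omega)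
      (by
        intro y hy
        obtain ⟨t, ht, hyf⟩ := List.mem_flatMap.mp hy
        have : f y = t := by simpa using (List.mem_filter.mp hyf).2
        have := ht2 t ht
        omega)
    rw [List.append_assoc] at hins
    rw [hins]
    simp

-- ---- keys and bounds for the counting sort ----

lemma getD_le_maxD (d : PySem.Dict Int Int) (k : Int) (hk : k ∈ d.keys) (hnd : d.keys.Nodup) :
    d.getD k 0 ≤ PySem.List.maxD d.values (fun x => x) 0 := by
  have hv : d.getD k 0 ∈ d.values := by
    rw [PySem.Dict.values_eq_map_keys d hnd 0]
    exact List.mem_map.mpr ⟨k, hk, rfl⟩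
  cases hmx : PySem.List.max? d.values (fun x => x) with
  | none =>
    rw [PySem.List.max?_eq_none_iff] at hmx
    rw [hmx] at hv; cases hv
  | some mx =>
    have := PySem.List.max?_isMax hmx _ hv
    simpa [PySem.List.maxD, hmx] using this

-- ---- assembling the else-branches ----

lemma main_else (domain : List (List (List Int))) (r c : Int)
    (hnd : (pvCell domain r c).Nodup)
    (hr0 : 0 ≤ r) (hc0 : 0 ≤ c)
    (hrn : r < ((PySem.List.pyGetD domain 0 []).length : Int))
    (hcn : c < ((PySem.List.pyGetD domain 0 []).length : Int))
    (hrb : PySem.Int.floordiv r 3 * 3 + 3 ≤ ((PySem.List.pyGetD domain 0 []).length : Int))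
    (hcb : PySem.Int.floordiv c 3 * 3 + 3 ≤ ((PySem.List.pyGetD domain 0 []).length : Int)) :
    PySem.List.sorted (pvDictA domain r c).keys (fun k => (pvDictA domain r c).getD k 0) false
      = pvOut (pvDictB domain r c) := by
  have hinit0 : ∀ k : Int, (pvInit (pvCell domain r c)).getD k 0 = 0 := fun k =>
    getD_init_fold _ _ _ (PySem.Dict.getD_empty k 0)
  have hkeys : (pvDictA domain r c).keys = (pvDictB domain r c).keys := by
    rw [keys_dictA, keys_dictB]
  have hfun : (fun k => (pvDictA domain r c).getD k 0)
      = (fun k => (pvDictB domain r c).getD k 0) :=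
    funext (getD_AB domain r c hnd hr0 hc0 hrn hcn hrb hcb)
  rw [hkeys, hfun]
  have hknd : (pvDictB domain r c).keys.Nodup := by
    rw [keys_dictB]
    exact PySem.Dict.nodup_keys_foldl_insert _ _ _ (by simp [PySem.Dict.keys_empty])
  have hnonneg : ∀ k : Int, 0 ≤ (pvDictB domain r c).getD k 0 := by
    intro k
    unfold pvDictB
    rw [getD_scan domain r c ((PySem.List.pyGetD domain 0 []).length)
          (pvInit (pvCell domain r c)) k ((pvInit (pvCell domain r c)).contains k) rfl,
        hinit0, zero_add]
    split
    · refine List.sum_nonneg ?_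
      intro x hx
      obtain ⟨i, -, rfl⟩ := List.mem_map.mp hx
      refine List.sum_nonneg ?_
      intro y hy
      obtain ⟨j, -, rfl⟩ := List.mem_map.mp hy
      split
      · exact Int.natCast_nonneg _
      · exact le_refl 0
    · exact le_refl 0
  have hle : ∀ k ∈ (pvDictB domain r c).keys,
      (pvDictB domain r c).getD k 0
        ≤ PySem.List.maxD (pvDictB domain r c).values (fun x => x) 0 :=
    fun k hk => getD_le_maxD _ k hk hknd
  have hmem : ∀ k ∈ (pvDictB domain r c).keys,
      (pvDictB domain r c).getD k 0
        ∈ PySem.List.pyRange 0 (PySem.List.maxD (pvDictB domain r c).values (fun x => x) 0 + 1) 1 := by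
    intro k hk
    exact PySem.List.mem_pyRange_one.mpr ⟨hnonneg k, by have := hle k hk; omega⟩
  rw [PySem.List.sorted_eq_foldl_insertBy,
      foldl_insertBy_buckets (fun k => (pvDictB domain r c).getD k 0)
        (pvDictB domain r c).keys
        (PySem.List.pyRange 0 (PySem.List.maxD (pvDictB domain r c).values (fun x => x) 0 + 1) 1)
        (PySem.List.pairwise_lt_pyRange_one _ _) hmem]
  rfl

-- the else-branch of A on an empty cell returns []
lemma main_empty (domain : List (List (List Int))) (r c : Int)
    (hcell : pvCell domain r c = []) :
    PySem.List.sorted (pvDictA domain r c).keys (fun k => (pvDictA domain r c).getD k 0) false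
      = [] := by
  have hk : (pvDictA domain r c).keys = [] := by
    rw [keys_dictA, keys_init, PySem.Dict.keys_empty, hcell]; rfl
  rw [hk]; rfl

-- ===== VERDICT (by name: the statement is the Claim_ definition above) =====
theorem lcv_heuristic_spec : Claim_equal_lcv_heuristic := by
  intro domain position _hdom hpre
  obtain ⟨-, -, h2⟩ := hpre
  unfold Spec_lcv_heuristic lcv_heuristic lcv_heuristic_alt
  by_cases hlen1 :
      (PySem.List.pyGetD (PySem.List.pyGetD domain position.1 []) position.2 []).length = 1
  · -- singleton cell: both return it
    rw [if_pos hlen1, if_pos (by omega)]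
  · by_cases hlen0 :
        (PySem.List.pyGetD (PySem.List.pyGetD domain position.1 []) position.2 []).length = 0
    · -- empty cell: A's else-branch gives [], B returns the cell itself
      have hcell :
          PySem.List.pyGetD (PySem.List.pyGetD domain position.1 []) position.2 [] = [] :=
        List.length_eq_zero_iff.mp hlen0
      rw [if_neg hlen1, if_pos (by omega)]
      exact (main_empty domain position.1 position.2 hcell).trans hcell.symm
    · -- two or more candidates
      obtain ⟨hnd, hr0, hc0, -, -, hrn, hcn, hrb, hcb⟩ := h2 (by omega)
      rw [if_neg hlen1, if_neg (by omega)]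
      exact main_else domain position.1 position.2 hnd hr0 hc0 hrn hcn hrb hcb
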